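-- pv_equiv track=rewrite | github.com/kapilrk-04/MixMatch-PyTorch | training_utils.py | calculate_interleave_offsets
-- ===== SOURCE A (Python) =====
-- def calculate_interleave_offsets(batch, nu):
--     groups = [batch // (nu + 1)] * (nu + 1)
--     for x in range(batch - sum(groups)):
--         groups[-x - 1] += 1
--     offsets = [0]
--     for g in groups:
--         offsets.append(offsets[-1] + g)
--     return offsets
-- ===== SOURCE B (Python) =====
-- def calculate_interleave_offsets(batch, nu):
--     n = nu + 1
--     base, rem = divmod(batch, n)
--     cut = n - rem
--     return [0] + [i * base + max(0, i - cut) for i in range(1, n + 1)]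
-- ===== Notes on version B (the rewrite author's own statement) =====
-- stated objective: alternative
-- what changed: Replaces the build-groups-then-prefix-sum two-loop construction by one divmod and a single comprehension emitting each offset via the closed form i*base + max(0, i - (n - rem)); it trades the running accumulator for a per-index multiplication.
import Mathlib
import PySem

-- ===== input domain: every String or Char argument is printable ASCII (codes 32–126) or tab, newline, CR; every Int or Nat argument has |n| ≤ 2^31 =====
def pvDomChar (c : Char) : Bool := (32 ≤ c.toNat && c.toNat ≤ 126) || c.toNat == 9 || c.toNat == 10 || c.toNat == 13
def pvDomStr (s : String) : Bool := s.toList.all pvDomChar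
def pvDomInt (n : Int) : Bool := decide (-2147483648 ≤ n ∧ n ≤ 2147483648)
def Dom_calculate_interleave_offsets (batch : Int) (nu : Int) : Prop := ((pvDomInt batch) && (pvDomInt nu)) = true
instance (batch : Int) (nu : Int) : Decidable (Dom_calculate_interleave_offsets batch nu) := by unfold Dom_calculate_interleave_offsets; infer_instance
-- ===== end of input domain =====

-- B replaces the build-groups-then-prefix-sum loops by one divmod and a single closed-form pass (objective: alternative).

-- ===== PORT A =====
def calculate_interleave_offsets (batch : Int) (nu : Int) : List Int :=
  let groups : List Int :=
    PySem.List.pyRepeat [PySem.Int.floordiv batch (nu + 1)] (nu + 1)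
  let groups2 :=
    (PySem.List.pyRange 0 (batch - groups.sum) 1).foldl
      (fun gs x => PySem.List.pySetD gs (-x - 1) (PySem.List.pyGetD gs (-x - 1) 0 + 1)) groups
  groups2.foldl (fun offs g => offs ++ [PySem.List.pyGetD offs (-1) 0 + g]) [0]

-- ===== PORT B =====
def calculate_interleave_offsets_alt (batch : Int) (nu : Int) : List Int :=
  let n := nu + 1
  match PySem.Int.divmod? batch n with
  | none => []
  | some (base, rem) =>
    let cut := n - rem
    [0] ++ (PySem.List.pyRange 1 (n + 1) 1).map (fun i => i * base + max 0 (i - cut))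

-- ===== PRECONDITION & SPEC =====
-- Pre_ excludes exactly the inputs where A raises: nu = -1 (ZeroDivisionError in batch // (nu+1))
-- and nu < -1 with batch > 0 (groups is empty, groups[-1] += 1 raises IndexError).
def Pre_calculate_interleave_offsets (batch : Int) (nu : Int) : Prop :=
  nu + 1 ≠ 0 ∧ (0 < nu + 1 ∨ batch ≤ 0)
instance (batch : Int) (nu : Int) : Decidable (Pre_calculate_interleave_offsets batch nu) := by unfold Pre_calculate_interleave_offsets; infer_instance
def pvWitness_calculate_interleave_offsets : Int × Int := (10, 2)

def Spec_calculate_interleave_offsets (batch : Int) (nu : Int) (out : List Int) : Prop := out = calculate_interleave_offsets_alt batch nu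
instance (batch : Int) (nu : Int) (out : List Int) : Decidable (Spec_calculate_interleave_offsets batch nu out) := by unfold Spec_calculate_interleave_offsets; infer_instance

-- ===== CLAIM (what is proved, stated in full; the proofs are below) =====
def Claim_equal_calculate_interleave_offsets : Prop := ∀ (batch : Int) (nu : Int), Dom_calculate_interleave_offsets batch nu → Pre_calculate_interleave_offsets batch nu → Spec_calculate_interleave_offsets batch nu (calculate_interleave_offsets batch nu)

-- ===== LEMMAS AND PROOFS =====

theorem pv_pySetD_neg (xs : List Int) (k : Nat) (v : Int) (h1 : 0 < k) (h2 : k ≤ xs.length) :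
    PySem.List.pySetD xs (-(k:Int)) v = xs.set (xs.length - k) v := by
  simp [PySem.List.pySetD, PySem.List.pySet?, PySem.List.pyIdx?, h1.ne', h2]

-- the increment loop bumps the last r entries of [base] * N
theorem pv_loop (N : Nat) (base : Int) (r : Nat) (hr : r ≤ N) :
    (PySem.List.pyRange 0 (r:Int) 1).foldl
      (fun gs x => PySem.List.pySetD gs (-x - 1) (PySem.List.pyGetD gs (-x - 1) 0 + 1))
      (List.replicate N base)
    = (List.range N).map (fun j => if N - r ≤ j then base + 1 else base) := by
  induction r with
  | zero =>
    rw [show ((0:Nat):Int) = 0 from rfl, PySem.List.pyRange_one_eq_nil (by omega), List.foldl_nil]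
    apply List.ext_getElem
    · simp
    · intro i h1 h2
      simp only [List.getElem_replicate, List.getElem_map, List.getElem_range]
      rw [if_neg (by simp at h2; omega)]
  | succ r ih =>
    rw [show ((r+1:Nat):Int) = (r:Int)+1 by push_cast; ring,
        PySem.List.pyRange_one_succ_right (by positivity), List.foldl_append, ih (by omega),
        List.foldl_cons, List.foldl_nil]
    have hlen : ((List.range N).map (fun j => if N - r ≤ j then base + 1 else base)).length = N := by simp
    have hidx : -(r:Int) - 1 = -(((r+1:Nat)):Int) := by push_cast; ring
    rw [hidx, PySem.List.pyGetD_neg_natCast _ (r+1) 0 (by omega) (by rw [hlen]; omega),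
        pv_pySetD_neg _ _ _ (by omega) (by rw [hlen]; omega)]
    simp only [List.length_map, List.length_range, List.getElem_map, List.getElem_range]
    rw [if_neg (show ¬ (N - r ≤ N - (r+1)) by omega)]
    apply List.ext_getElem
    · simp
    · intro i h1 h2
      simp only [List.getElem_set, List.getElem_map, List.getElem_range]
      by_cases hc : N - (r+1) = i
      · rw [if_pos hc, if_pos (by omega)]
      · rw [if_neg hc]
        by_cases hc2 : N - r ≤ i
        · rw [if_pos hc2, if_pos (by omega)]
        · rw [if_neg hc2, if_neg (by omega)]

-- running prefix-sum appender
def pvSums (v : Int) : List Int → List Int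
  | [] => [v]
  | g :: gs => v :: pvSums (v + g) gs

theorem pv_prefix (gs : List Int) : ∀ (offs : List Int) (v : Int),
    gs.foldl (fun offs g => offs ++ [PySem.List.pyGetD offs (-1) 0 + g]) (offs ++ [v])
      = offs ++ pvSums v gs := by
  induction gs with
  | nil => intro offs v; simp [pvSums]
  | cons g gs ih =>
    intro offs v
    simp only [List.foldl_cons]
    rw [PySem.List.pyGetD_neg_one_append_singleton, show (offs ++ [v]) ++ [v + g]
          = (offs ++ [v]) ++ [v + g] from rfl, ih (offs ++ [v]) (v+g)]
    simp [pvSums]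

theorem pv_sums_map (f F : Nat → Int) : ∀ (k a : Nat),
    (∀ j, a ≤ j → j < a + k → F (j+1) = F j + f j) →
    pvSums (F a) ((List.range' a k).map f) = (List.range' a (k+1)).map F
  | 0, a, _ => by simp [pvSums]
  | (k+1), a, h => by
    rw [List.range'_succ, List.map_cons]
    simp only [pvSums]
    rw [show F a + f a = F (a+1) from (h a (le_refl a) (by omega)).symm,
        pv_sums_map f F k (a+1) (fun j hj hj2 => h j (by omega) (by omega))]
    rw [List.range'_succ (s := a) (n := k+1), List.map_cons]

-- ===== VERDICT (by name: the statement is the Claim_ definition above) =====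
theorem calculate_interleave_offsets_spec : Claim_equal_calculate_interleave_offsets := by
  intro batch nu _ hpre
  obtain ⟨hne, hcase⟩ := hpre
  unfold Spec_calculate_interleave_offsets calculate_interleave_offsets calculate_interleave_offsets_alt
  simp only []
  rw [show PySem.Int.divmod? batch (nu+1)
        = some (PySem.Int.floordiv batch (nu+1), PySem.Int.mod batch (nu+1)) from by
      simp [PySem.Int.divmod?, hne, PySem.Int.floordiv, PySem.Int.mod]]
  simp only [PySem.List.pyRepeat_singleton]
  rcases lt_or_gt_of_ne hne with hneg | hpos
  · -- nu + 1 < 0 : groups is empty, batch ≤ 0, both sides are [0]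
    have hb : batch ≤ 0 := by rcases hcase with h | h <;> omega
    rw [show (nu+1).toNat = 0 from Int.toNat_of_nonpos (by omega), List.replicate_zero,
        List.sum_nil, sub_zero, PySem.List.pyRange_one_eq_nil (by omega), List.foldl_nil,
        List.foldl_nil, PySem.List.pyRange_one_eq_nil (by omega), List.map_nil, List.append_nil]
  · -- nu + 1 > 0
    set N : Nat := (nu+1).toNat with hNdef
    have hN : ((N:Nat):Int) = nu + 1 := Int.toNat_of_nonneg (by omega)
    set base : Int := PySem.Int.floordiv batch (nu+1) with hbase
    have hfm := PySem.Int.floordiv_mul_add_mod batch (nu+1)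
    have hm0 : 0 ≤ PySem.Int.mod batch (nu+1) := PySem.Int.mod_nonneg batch hpos
    have hmlt : PySem.Int.mod batch (nu+1) < nu + 1 := PySem.Int.mod_lt batch hpos
    set r : Nat := (PySem.Int.mod batch (nu+1)).toNat with hrdef
    have hr : ((r:Nat):Int) = PySem.Int.mod batch (nu+1) := Int.toNat_of_nonneg hm0
    have hrN : r ≤ N := by omega
    have hsum : batch - (List.replicate N base).sum = (r:Int) := by
      rw [List.sum_replicate, nsmul_eq_mul, hN, hr]
      linarith [hfm]
    rw [hsum, pv_loop N base r hrN, List.range_eq_range']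
    rw [show ([0]:List Int) = [] ++ [0] from rfl, pv_prefix, List.nil_append]
    have hF0 : (0:Int) = ((0:Nat):Int) * base + max 0 (((0:Nat):Int) - ((N:Int) - (r:Int))) := by
      simp; omega
    rw [hF0, pv_sums_map (fun j => if N - r ≤ j then base + 1 else base)
          (fun j => (j:Int) * base + max 0 ((j:Int) - ((N:Int) - (r:Int)))) N 0 ?_]
    · -- closed forms match
      rw [PySem.List.pyRange_one,
          show ((nu + 1 + 1 - 1).toNat) = N from by rw [show nu+1+1-1 = nu+1 from by ring],
          List.map_map, List.range'_succ, List.map_cons,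
          List.range'_eq_map_range, List.map_map]
      have h0 : ((0:Nat):Int) * base + max 0 (((0:Nat):Int) - ((N:Int) - (r:Int))) = 0 := by
        simp; omega
      rw [h0]
      have : ∀ k : Nat, (((1 + k : Nat) : Int)) * base + max 0 ((((1 + k : Nat)):Int) - ((N:Int) - (r:Int)))
            = (1 + (k:Int)) * base + max 0 ((1 + (k:Int)) - ((nu + 1) - PySem.Int.mod batch (nu+1))) := by
        intro k; rw [← hr, ← hN]; push_cast; ring_nf
      simp only [Function.comp_def, this]
      rfl
    · -- step condition
      intro j _ hj
      dsimp only
      by_cases hc : N - r ≤ j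
      · rw [if_pos hc]
        have hcI : ((N:Int) - (r:Int)) ≤ (j:Int) := by omega
        have h1 : max 0 (((j+1:Nat):Int) - ((N:Int) - (r:Int))) = ((j+1:Nat):Int) - ((N:Int) - (r:Int)) :=
          max_eq_right (by push_cast; omega)
        have h2 : max 0 (((j:Nat):Int) - ((N:Int) - (r:Int))) = ((j:Nat):Int) - ((N:Int) - (r:Int)) :=
          max_eq_right (by omega)
        rw [h1, h2]; push_cast; ring
      · rw [if_neg hc]
        have h1 : max 0 (((j+1:Nat):Int) - ((N:Int) - (r:Int))) = 0 :=
          max_eq_left (by push_cast; omega)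
        have h2 : max 0 (((j:Nat):Int) - ((N:Int) - (r:Int))) = 0 :=
          max_eq_left (by omega)
        rw [h1, h2]; push_cast; ring
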